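-- pv_equiv track=rewrite | github.com/9ml121/07-leetcode-python | D-回溯算法/回溯算法+排列组合/最多几个直角三角形.py | dfs
-- ===== SOURCE A (Python) =====
-- def dfs(case, n, idx, used, cnt):
--     ans = cnt
--
--     for i in range(idx, n):
--         if used[i]:
--             continue
--         for j in range(i+1, n):
--             if used[j]:
--                 continue
--             for k in range(j+1, n):
--                 if used[k]:
--                     continue
--
--                 a = case[i]
--                 b = case[j]
--                 c = case[k]
--                 if a**2 + b**2 == c**2:
--                     used[i] = True
--                     used[j] = True
--                     used[k] = True
--                     # todo 注意这里更新结果，是取每次递归树中能组成的最多组合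
--                     res = dfs(case, n, idx+1, used, cnt+1)
--                     ans = max(ans, res)
--
--                     used[i] = False
--                     used[j] = False
--                     used[k] = False
--     return ans
-- ===== SOURCE B (Python) =====
-- def dfs(case, n, idx, used, cnt):
--     # Enumerate every candidate triple once (index-ordered: hypotenuse at the
--     # largest index, only indices not already marked used), then find the
--     # maximum number of pairwise-disjoint triples by a pick/skip recursion
--     # over that precomputed list.  `used` is never mutated.
--     triples = [(i, j, k)
--                for i in range(idx, n) if not used[i]
--                for j in range(i + 1, n) if not used[j]
--                for k in range(j + 1, n) if not used[k]
--                if case[i] ** 2 + case[j] ** 2 == case[k] ** 2]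
--
--     def solve(ts, occupied):
--         if not ts:
--             return 0
--         (i, j, k), rest = ts[0], ts[1:]
--         best = solve(rest, occupied)
--         if i not in occupied and j not in occupied and k not in occupied:
--             best = max(best, 1 + solve(rest, occupied | {i, j, k}))
--         return best
--
--     return cnt + solve(triples, set())
-- ===== Notes on version B (the rewrite author's own statement) =====
-- stated objective: alternative
-- what changed: A re-scans all index triples with a backtracking DFS that mutates/restores `used` at every recursion level; B enumerates the valid Pythagorean index triples once into a list and then finds the maximum number of pairwise-disjoint triples by a pick/skip recursion over that precomputed list with an occupied-index set, never mutating `used`.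
-- outside the precondition, e.g. on dfs([3, 4, 5], 3, -3, [False, False, False], 0): A returns 1, B returns 2; on dfs([], 2, 0, [False, False], 5): A returns 5, B returns 5
import Mathlib
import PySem

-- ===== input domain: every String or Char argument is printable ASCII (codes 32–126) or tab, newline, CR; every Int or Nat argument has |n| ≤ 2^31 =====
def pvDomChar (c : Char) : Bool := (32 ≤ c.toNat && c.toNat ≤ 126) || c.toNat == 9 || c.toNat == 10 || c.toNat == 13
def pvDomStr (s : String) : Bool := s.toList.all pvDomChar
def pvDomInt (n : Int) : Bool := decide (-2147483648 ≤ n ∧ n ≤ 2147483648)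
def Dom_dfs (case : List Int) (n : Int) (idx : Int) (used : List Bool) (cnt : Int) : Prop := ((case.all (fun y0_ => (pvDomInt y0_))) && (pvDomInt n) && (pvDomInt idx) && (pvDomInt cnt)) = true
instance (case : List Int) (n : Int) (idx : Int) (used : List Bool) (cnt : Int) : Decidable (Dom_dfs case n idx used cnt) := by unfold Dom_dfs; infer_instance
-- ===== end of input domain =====

-- B enumerates the candidate triples once and searches pick/skip over that list, instead of
-- A's re-scan of all index triples at every recursion level (objective: alternative decomposition).
-- A mutates `used` during the search but restores it before returning, so the caller sees no
-- mutation; B never mutates. The equivalence proved here is about the return value.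

-- ===== PORT A =====
-- literal transliteration of A's triple-nested loop with backtracking: Python's used[i]/case[i]
-- reads are pyGetD (exact under Pre_: every touched index is in range and nonnegative),
-- `used[i] = True` is pySetD (exact Python item assignment); the undo assignments are the
-- identity on the pure state threading and so do not appear.
def dfs (case : List Int) (n : Int) (idx : Int) (used : List Bool) (cnt : Int) : Int :=
  (PySem.List.pyRange idx n 1).attach.foldl
    (fun ans it =>
      if PySem.List.pyGetD used it.1 false then ans
      else
        (PySem.List.pyRange (it.1+1) n 1).foldl
          (fun ans j =>
            if PySem.List.pyGetD used j false then ans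
            else
              (PySem.List.pyRange (j+1) n 1).foldl
                (fun ans k =>
                  if PySem.List.pyGetD used k false then ans
                  else
                    let a := PySem.List.pyGetD case it.1 0
                    let b := PySem.List.pyGetD case j 0
                    let c := PySem.List.pyGetD case k 0
                    if a^2 + b^2 = c^2 then
                      max ans (dfs case n (idx+1)
                        (PySem.List.pySetD (PySem.List.pySetD (PySem.List.pySetD used it.1 true) j true) k true)
                        (cnt+1))
                    else ans)
                ans)
          ans)
    cnt
termination_by (n - idx).toNat
decreasing_by
  have h := PySem.List.mem_pyRange_one.mp it.2
  omega

-- ===== PORT B =====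
-- B's triple comprehension, transliterated as nested flatMaps (a comprehension is a flatMap chain).
def trips (case : List Int) (n : Int) (idx : Int) (used : List Bool) : List (Int × Int × Int) :=
  (PySem.List.pyRange idx n 1).flatMap (fun i =>
    if PySem.List.pyGetD used i false then []
    else (PySem.List.pyRange (i+1) n 1).flatMap (fun j =>
      if PySem.List.pyGetD used j false then []
      else (PySem.List.pyRange (j+1) n 1).flatMap (fun k =>
        if PySem.List.pyGetD used k false then []
        else if (PySem.List.pyGetD case i 0)^2 + (PySem.List.pyGetD case j 0)^2 = (PySem.List.pyGetD case k 0)^2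
        then [(i, j, k)] else [])))

-- B's pick/skip recursion over the precomputed triple list, `occupied` a Python set of indices.
def solve : List (Int × Int × Int) → PySem.Set Int → Int
  | [], _ => 0
  | t :: rest, occ =>
    let best := solve rest occ
    if !(PySem.Set.contains occ t.1) && !(PySem.Set.contains occ t.2.1) && !(PySem.Set.contains occ t.2.2) then
      max best (1 + solve rest (PySem.Set.add (PySem.Set.add (PySem.Set.add occ t.1) t.2.1) t.2.2))
    else best

def dfs_alt (case : List Int) (n : Int) (idx : Int) (used : List Bool) (cnt : Int) : Int :=
  cnt + solve (trips case n idx used) PySem.Set.empty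

-- ===== PRECONDITION & SPEC =====
-- Pre_ excludes (a) inputs where an index in [idx, n) can fall outside `used` or `case`
-- (A raises IndexError on `used` whenever idx < n and n > len(used), and can raise on `case`
-- when n > len(case)), and (b) negative idx with idx < n, which is outside the natural domain
-- of a start index: there Python's negative-index wraparound aliases list positions and A's
-- value is an accident of that aliasing.
def Pre_dfs (case : List Int) (n : Int) (idx : Int) (used : List Bool) (cnt : Int) : Prop :=
  (0 ≤ idx ∧ n ≤ (used.length : Int) ∧ n ≤ (case.length : Int)) ∨ n ≤ idx
instance (case : List Int) (n : Int) (idx : Int) (used : List Bool) (cnt : Int) : Decidable (Pre_dfs case n idx used cnt) := by unfold Pre_dfs; infer_instance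

def pvWitness_dfs : List Int × Int × Int × List Bool × Int := ([3, 4, 5, 12, 13], 5, 0, [false, false, false, false, false], 0)

def Spec_dfs (case : List Int) (n : Int) (idx : Int) (used : List Bool) (cnt : Int) (out : Int) : Prop := out = dfs_alt case n idx used cnt
instance (case : List Int) (n : Int) (idx : Int) (used : List Bool) (cnt : Int) (out : Int) : Decidable (Spec_dfs case n idx used cnt out) := by unfold Spec_dfs; infer_instance

-- ===== CLAIM (what is proved, stated in full; the proofs are below) =====
def Claim_equal_dfs : Prop := ∀ (case : List Int) (n : Int) (idx : Int) (used : List Bool) (cnt : Int), Dom_dfs case n idx used cnt → Pre_dfs case n idx used cnt → Spec_dfs case n idx used cnt (dfs case n idx used cnt)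

-- ===== LEMMAS AND PROOFS =====

-- x is one of the three indices of triple t
def tmem (x : Int) (t : Int × Int × Int) : Prop := x = t.1 ∨ x = t.2.1 ∨ x = t.2.2

-- two triples share no index
def disjT (t u : Int × Int × Int) : Prop := ∀ x, tmem x t → ¬ tmem x u

-- the three indices of u avoid occ
def okT (occ : List Int) (u : Int × Int × Int) : Prop := u.1 ∉ occ ∧ u.2.1 ∉ occ ∧ u.2.2 ∉ occ

-- marking one triple in `used` (what A's three assignments do before recursing)
def markT (used : List Bool) (t : Int × Int × Int) : List Bool :=
  PySem.List.pySetD (PySem.List.pySetD (PySem.List.pySetD used t.1 true) t.2.1 true) t.2.2 true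

theorem disjT_symm {t u : Int × Int × Int} (h : disjT t u) : disjT u t := by
  intro x hxu hxt; exact h x hxt hxu

theorem disjT_ne {t u : Int × Int × Int} (h : disjT t u) : t ≠ u := by
  intro he; exact h t.1 (Or.inl rfl) (he ▸ Or.inl rfl)

theorem pairwise_nodup {F : List (Int × Int × Int)} (h : F.Pairwise disjT) : F.Nodup :=
  h.imp (fun hd => disjT_ne hd)

theorem mem_trips {case : List Int} {n idx : Int} {used : List Bool} {t : Int × Int × Int} :
    t ∈ trips case n idx used ↔
      idx ≤ t.1 ∧ t.1 < t.2.1 ∧ t.2.1 < t.2.2 ∧ t.2.2 < n ∧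
      PySem.List.pyGetD used t.1 false = false ∧ PySem.List.pyGetD used t.2.1 false = false ∧
      PySem.List.pyGetD used t.2.2 false = false ∧
      (PySem.List.pyGetD case t.1 0)^2 + (PySem.List.pyGetD case t.2.1 0)^2 = (PySem.List.pyGetD case t.2.2 0)^2 := by
  obtain ⟨i, j, k⟩ := t
  simp only [trips, List.mem_flatMap, List.mem_ite_nil_left, PySem.List.mem_pyRange_one,
    Bool.not_eq_true, List.mem_singleton, List.mem_ite_nil_right, Prod.mk.injEq]
  constructor
  · rintro ⟨i', ⟨hi1, hi2⟩, hui, j', ⟨hj1, hj2⟩, huj, k', ⟨hk1, hk2⟩, huk, hp, rfl, rfl, rfl⟩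
    exact ⟨hi1, by omega, by omega, hk2, hui, huj, huk, hp⟩
  · rintro ⟨h1, h2, h3, h4, h5, h6, h7, h8⟩
    exact ⟨i, ⟨h1, by omega⟩, h5, j, ⟨by omega, by omega⟩, h6, k, ⟨by omega, h4⟩, h7, h8, rfl, rfl, rfl⟩

theorem trips_nil {case : List Int} {n idx : Int} {used : List Bool} (h : n ≤ idx) :
    trips case n idx used = [] := by
  simp [trips, PySem.List.pyRange_one_eq_nil h]

theorem solve_nonneg : ∀ (ts : List (Int × Int × Int)) (occ : PySem.Set Int), 0 ≤ solve ts occ := by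
  intro ts
  induction ts with
  | nil => intro occ; simp [solve]
  | cons t rest ih =>
    intro occ
    simp only [solve]
    split
    · exact le_trans (ih occ) (le_max_left _ _)
    · exact ih occ

theorem solve_le_cons (t : Int × Int × Int) (ts : List (Int × Int × Int)) (occ : PySem.Set Int) :
    solve ts occ ≤ solve (t :: ts) occ := by
  simp only [solve]
  split
  · exact le_max_left _ _
  · exact le_refl _

theorem cond_true_iff (occ : PySem.Set Int) (t : Int × Int × Int) :
    ((!PySem.Set.contains occ t.1 && !PySem.Set.contains occ t.2.1 && !PySem.Set.contains occ t.2.2) = true)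
      ↔ okT occ t := by
  simp [okT, and_assoc]

theorem mem_add3 {occ : PySem.Set Int} {i j k y : Int} :
    y ∈ PySem.Set.add (PySem.Set.add (PySem.Set.add occ i) j) k ↔ y ∈ occ ∨ y = i ∨ y = j ∨ y = k := by
  simp [PySem.Set.mem_add, or_assoc]

theorem solve_complete : ∀ (ts : List (Int × Int × Int)) (occ : PySem.Set Int) (F : List (Int × Int × Int)),
    (∀ u ∈ F, u ∈ ts) → F.Pairwise disjT → (∀ u ∈ F, okT occ u) → (F.length : Int) ≤ solve ts occ := by
  intro ts
  induction ts with
  | nil =>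
    intro occ F hmem _ _
    have : F = [] := List.eq_nil_iff_forall_not_mem.mpr (fun u hu => by simpa using hmem u hu)
    subst this; simp [solve]
  | cons t rest ih =>
    intro occ F hmem hpw hok
    by_cases ht : t ∈ F
    · have hnd : F.Nodup := pairwise_nodup hpw
      have hcond : okT occ t := hok t ht
      have hmem' : ∀ u ∈ F.erase t, u ∈ rest := by
        intro u hu
        have h2 : u ≠ t := ((List.Nodup.mem_erase_iff hnd).mp hu).1
        have h1 := List.mem_of_mem_erase hu
        rcases List.mem_cons.mp (hmem u h1) with h | h
        · exact absurd h h2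
        · exact h
      have hpw' : (F.erase t).Pairwise disjT := hpw.sublist List.erase_sublist
      have hdisj : ∀ u ∈ F.erase t, disjT t u := by
        intro u hu
        have h2 : u ≠ t := ((List.Nodup.mem_erase_iff hnd).mp hu).1
        exact (hpw.forall (fun a b hab => disjT_symm hab)) ht (List.mem_of_mem_erase hu) h2.symm
      have hok' : ∀ u ∈ F.erase t, okT (PySem.Set.add (PySem.Set.add (PySem.Set.add occ t.1) t.2.1) t.2.2) u := by
        intro u hu
        obtain ⟨o1, o2, o3⟩ := hok u (List.mem_of_mem_erase hu)
        have hd := hdisj u hu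
        refine ⟨fun hm3 => ?_, fun hm3 => ?_, fun hm3 => ?_⟩
        · rcases mem_add3.mp hm3 with h | h | h | h
          · exact o1 h
          all_goals exact hd u.1 (by simp [tmem, h]) (Or.inl rfl)
        · rcases mem_add3.mp hm3 with h | h | h | h
          · exact o2 h
          all_goals exact hd u.2.1 (by simp [tmem, h]) (Or.inr (Or.inl rfl))
        · rcases mem_add3.mp hm3 with h | h | h | h
          · exact o3 h
          all_goals exact hd u.2.2 (by simp [tmem, h]) (Or.inr (Or.inr rfl))
      have hlen := List.length_erase_of_mem ht
      have hFpos : 0 < F.length := List.length_pos_of_mem ht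
      have hih := ih _ (F.erase t) hmem' hpw' hok'
      simp only [solve]
      rw [if_pos ((cond_true_iff occ t).mpr hcond)]
      have hstep : (F.length : Int) ≤ 1 + solve rest (PySem.Set.add (PySem.Set.add (PySem.Set.add occ t.1) t.2.1) t.2.2) := by
        rw [hlen] at hih; omega
      exact le_trans hstep (le_max_right _ _)
    · have hmem' : ∀ u ∈ F, u ∈ rest := by
        intro u hu
        rcases List.mem_cons.mp (hmem u hu) with h | h
        · exact absurd h (by rintro rfl; exact ht hu)
        · exact h
      exact le_trans (ih occ F hmem' hpw hok) (solve_le_cons t rest occ)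

theorem solve_sound : ∀ (ts : List (Int × Int × Int)) (occ : PySem.Set Int),
    ∃ F : List (Int × Int × Int),
      (∀ u ∈ F, u ∈ ts) ∧ F.Pairwise disjT ∧ (∀ u ∈ F, okT occ u) ∧ solve ts occ = (F.length : Int) := by
  intro ts
  induction ts with
  | nil => intro occ; exact ⟨[], by simp, by simp, by simp, by simp [solve]⟩
  | cons t rest ih =>
    intro occ
    obtain ⟨F1, hm1, hp1, ho1, he1⟩ := ih occ
    by_cases hc : (!PySem.Set.contains occ t.1 && !PySem.Set.contains occ t.2.1 && !PySem.Set.contains occ t.2.2) = true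
    · obtain ⟨F2, hm2, hp2, ho2, he2⟩ := ih (PySem.Set.add (PySem.Set.add (PySem.Set.add occ t.1) t.2.1) t.2.2)
      by_cases hbig : 1 + solve rest (PySem.Set.add (PySem.Set.add (PySem.Set.add occ t.1) t.2.1) t.2.2) ≤ solve rest occ
      · refine ⟨F1, fun u hu => List.mem_cons_of_mem t (hm1 u hu), hp1, ho1, ?_⟩
        simp only [solve]
        rw [if_pos hc, max_eq_left hbig, he1]
      · refine ⟨t :: F2, ?_, ?_, ?_, ?_⟩
        · intro u hu
          rcases List.mem_cons.mp hu with rfl | hu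
          · exact List.mem_cons_self ..
          · exact List.mem_cons_of_mem t (hm2 u hu)
        · refine List.pairwise_cons.mpr ⟨?_, hp2⟩
          intro u hu
          obtain ⟨o1, o2, o3⟩ := ho2 u hu
          intro x hxt hxu
          have hxmem : x ∈ PySem.Set.add (PySem.Set.add (PySem.Set.add occ t.1) t.2.1) t.2.2 := by
            rw [mem_add3]
            rcases hxt with h | h | h <;> simp [h]
          rcases hxu with h | h | h
          · exact o1 (h ▸ hxmem)
          · exact o2 (h ▸ hxmem)
          · exact o3 (h ▸ hxmem)
        · intro u hu
          rcases List.mem_cons.mp hu with rfl | hu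
          · exact (cond_true_iff occ u).mp hc
          · obtain ⟨o1, o2, o3⟩ := ho2 u hu
            exact ⟨fun h => o1 (mem_add3.mpr (Or.inl h)), fun h => o2 (mem_add3.mpr (Or.inl h)),
                   fun h => o3 (mem_add3.mpr (Or.inl h))⟩
        · simp only [solve]
          rw [if_pos hc, max_eq_right (by omega), he2]
          simp only [List.length_cons]
          push_cast
          omega
    · refine ⟨F1, fun u hu => List.mem_cons_of_mem t (hm1 u hu), hp1, ho1, ?_⟩
      simp only [solve]
      rw [if_neg hc, he1]

theorem foldl_max_le {g : Int × Int × Int → Int} {X : Int} :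
    ∀ (ts : List (Int × Int × Int)) (c : Int), c ≤ X → (∀ t ∈ ts, g t ≤ X) →
      List.foldl (fun a t => max a (g t)) c ts ≤ X := by
  intro ts
  induction ts with
  | nil => intro c hc _; exact hc
  | cons t rest ih =>
    intro c hc h
    simp only [List.foldl_cons]
    exact ih _ (max_le hc (h t (by simp))) (fun u hu => h u (by simp [hu]))

theorem foldl_max_flatMap {α : Type} (g : Int × Int × Int → Int) (f : α → List (Int × Int × Int)) :
    ∀ (xs : List α) (c : Int),
      List.foldl (fun a x => List.foldl (fun a' t => max a' (g t)) a (f x)) c xs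
        = List.foldl (fun a t => max a (g t)) c (xs.flatMap f) := by
  intro xs
  induction xs with
  | nil => intro c; simp
  | cons x rest ih => intro c; simp [List.foldl_append, ih]

theorem pyGetD_pySetD_true (xs : List Bool) (i m : Int) (hi0 : 0 ≤ i) (hil : i < (xs.length : Int)) (hm : 0 ≤ m) :
    PySem.List.pyGetD (PySem.List.pySetD xs i true) m false
      = if m = i then true else PySem.List.pyGetD xs m false := by
  obtain ⟨a, rfl⟩ : ∃ a : Nat, i = (a : Int) := ⟨i.toNat, by omega⟩
  obtain ⟨b, rfl⟩ : ∃ b : Nat, m = (b : Int) := ⟨m.toNat, by omega⟩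
  rw [PySem.List.pySetD_natCast, PySem.List.pyGetD_natCast, PySem.List.pyGetD_natCast]
  simp only [List.getD, List.getElem?_set]
  have hab : ((b : Int) = (a : Int)) ↔ (a = b) := by omega
  by_cases h : a = b
  · subst h
    simp [(by omega : a < xs.length)]
  · simp [h, hab]

theorem length_markT (used : List Bool) (t : Int × Int × Int) :
    ((markT used t).length : Int) = (used.length : Int) := by
  simp [markT, PySem.List.length_pySetD]

theorem markT_getD_false {used : List Bool} {t : Int × Int × Int} {m : Int}
    (h1 : 0 ≤ t.1) (h2 : t.1 < t.2.1) (h3 : t.2.1 < t.2.2) (h4 : t.2.2 < (used.length : Int)) (hm : 0 ≤ m) :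
    PySem.List.pyGetD (markT used t) m false = false ↔
      (PySem.List.pyGetD used m false = false ∧ ¬ tmem m t) := by
  have l1 : ((PySem.List.pySetD used t.1 true).length : Int) = (used.length : Int) := by
    simp [PySem.List.length_pySetD]
  have l2 : ((PySem.List.pySetD (PySem.List.pySetD used t.1 true) t.2.1 true).length : Int) = (used.length : Int) := by
    simp [PySem.List.length_pySetD]
  rw [markT,
    pyGetD_pySetD_true _ t.2.2 m (by omega) (by omega) hm,
    pyGetD_pySetD_true _ t.2.1 m (by omega) (by omega) hm,
    pyGetD_pySetD_true used t.1 m (by omega) (by omega) hm]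
  split_ifs <;> simp_all [tmem]

theorem exists_min_fst : ∀ (F : List (Int × Int × Int)), F ≠ [] → ∃ t ∈ F, ∀ u ∈ F, t.1 ≤ u.1 := by
  intro F
  induction F with
  | nil => intro h; exact absurd rfl h
  | cons t rest ih =>
    intro _
    by_cases hr : rest = []
    · subst hr
      exact ⟨t, by simp, by simp⟩
    · obtain ⟨t0, ht0, hmin⟩ := ih hr
      by_cases hle : t.1 ≤ t0.1
      · refine ⟨t, by simp, ?_⟩
        intro u hu
        rcases List.mem_cons.mp hu with rfl | hu
        · exact le_refl _
        · exact le_trans hle (hmin u hu)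
      · refine ⟨t0, List.mem_cons_of_mem t ht0, ?_⟩
        intro u hu
        rcases List.mem_cons.mp hu with rfl | hu
        · omega
        · exact hmin u hu

theorem dfs_base {case : List Int} {n idx : Int} {used : List Bool} {cnt : Int} (h : n ≤ idx) :
    dfs case n idx used cnt = cnt := by
  rw [dfs, PySem.List.pyRange_one_eq_nil h]
  rfl

theorem dfs_eq_fold (case : List Int) (n idx : Int) (used : List Bool) (cnt : Int) :
    dfs case n idx used cnt
      = List.foldl (fun a t => max a (dfs case n (idx+1) (markT used t) (cnt+1))) cnt (trips case n idx used) := by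
  have h0 : dfs case n idx used cnt = (PySem.List.pyRange idx n 1).foldl (fun ans i =>
      if PySem.List.pyGetD used i false then ans
      else
        (PySem.List.pyRange (i+1) n 1).foldl
          (fun ans j =>
            if PySem.List.pyGetD used j false then ans
            else
              (PySem.List.pyRange (j+1) n 1).foldl
                (fun ans k =>
                  if PySem.List.pyGetD used k false then ans
                  else
                    let a := PySem.List.pyGetD case i 0
                    let b := PySem.List.pyGetD case j 0
                    let c := PySem.List.pyGetD case k 0
                    if a^2 + b^2 = c^2 then
                      max ans (dfs case n (idx+1)
                        (PySem.List.pySetD (PySem.List.pySetD (PySem.List.pySetD used i true) j true) k true)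
                        (cnt+1))
                    else ans)
                ans)
          ans) cnt := by
    rw [dfs]
    exact List.foldl_attach (f := fun ans i =>
      if PySem.List.pyGetD used i false then ans
      else
        (PySem.List.pyRange (i+1) n 1).foldl
          (fun ans j =>
            if PySem.List.pyGetD used j false then ans
            else
              (PySem.List.pyRange (j+1) n 1).foldl
                (fun ans k =>
                  if PySem.List.pyGetD used k false then ans
                  else
                    let a := PySem.List.pyGetD case i 0
                    let b := PySem.List.pyGetD case j 0
                    let c := PySem.List.pyGetD case k 0
                    if a^2 + b^2 = c^2 then
                      max ans (dfs case n (idx+1)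
                        (PySem.List.pySetD (PySem.List.pySetD (PySem.List.pySetD used i true) j true) k true)
                        (cnt+1))
                    else ans)
                ans)
          ans)
  rw [h0, trips, ← foldl_max_flatMap]
  apply PySem.List.foldl_congr_mem
  intro acc i _
  by_cases hui : PySem.List.pyGetD used i false = true
  · simp [hui]
  · rw [if_neg hui, if_neg hui, ← foldl_max_flatMap]
    apply PySem.List.foldl_congr_mem
    intro acc2 j _
    by_cases huj : PySem.List.pyGetD used j false = true
    · simp [huj]
    · rw [if_neg huj, if_neg huj, ← foldl_max_flatMap]
      apply PySem.List.foldl_congr_mem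
      intro acc3 k _
      by_cases huk : PySem.List.pyGetD used k false = true
      · simp [huk]
      · rw [if_neg huk, if_neg huk]
        dsimp only
        by_cases hp : (PySem.List.pyGetD case i 0)^2 + (PySem.List.pyGetD case j 0)^2 = (PySem.List.pyGetD case k 0)^2
        · rw [if_pos hp, if_pos hp]
          simp [markT]
        · rw [if_neg hp, if_neg hp]
          rfl

theorem dfs_main (case : List Int) (n : Int) :
    ∀ (fuel : Nat) (idx : Int) (used : List Bool) (cnt : Int),
      (n - idx).toNat ≤ fuel → 0 ≤ idx → n ≤ (used.length : Int) → n ≤ (case.length : Int) →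
      dfs case n idx used cnt = cnt + solve (trips case n idx used) PySem.Set.empty := by
  intro fuel
  induction fuel with
  | zero =>
    intro idx used cnt hf h0 hu hc
    have hni : n ≤ idx := by omega
    rw [dfs_base hni, trips_nil hni]
    simp [solve]
  | succ fuel ih =>
    intro idx used cnt hf h0 hu hc
    by_cases hni : n ≤ idx
    · rw [dfs_base hni, trips_nil hni]
      simp [solve]
    · replace hni : idx < n := by omega
      rw [dfs_eq_fold]
      have hg : ∀ t ∈ trips case n idx used,
          dfs case n (idx+1) (markT used t) (cnt+1)
            = (cnt+1) + solve (trips case n (idx+1) (markT used t)) PySem.Set.empty := by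
        intro t _
        exact ih (idx+1) (markT used t) (cnt+1) (by omega) (by omega)
          (by rw [length_markT]; exact hu) hc
      have hfold : List.foldl (fun a t => max a (dfs case n (idx+1) (markT used t) (cnt+1))) cnt (trips case n idx used)
          = List.foldl (fun a t => max a ((cnt+1) + solve (trips case n (idx+1) (markT used t)) PySem.Set.empty)) cnt (trips case n idx used) := by
        apply PySem.List.foldl_congr_mem
        intro acc t ht
        rw [hg t ht]
      rw [hfold]
      apply le_antisymm
      · apply foldl_max_le
        · have := solve_nonneg (trips case n idx used) PySem.Set.empty
          omega
        · intro t ht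
          obtain ⟨c1, c2, c3, c4, c5, c6, c7, c8⟩ := mem_trips.mp ht
          obtain ⟨F, hm, hp, _, he⟩ := solve_sound (trips case n (idx+1) (markT used t)) PySem.Set.empty
          have hmem2 : ∀ u ∈ F, u ∈ trips case n idx used ∧ disjT t u := by
            intro u hu
            obtain ⟨d1, d2, d3, d4, d5, d6, d7, d8⟩ := mem_trips.mp (hm u hu)
            have hU1 := (markT_getD_false (by omega) c2 c3 (by omega) (by omega)).mp d5
            have hU2 := (markT_getD_false (by omega) c2 c3 (by omega) (by omega)).mp d6
            have hU3 := (markT_getD_false (by omega) c2 c3 (by omega) (by omega)).mp d7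
            constructor
            · exact mem_trips.mpr ⟨by omega, d2, d3, d4, hU1.1, hU2.1, hU3.1, d8⟩
            · intro x hxt hxu
              rcases hxu with h | h | h
              · exact hU1.2 (h ▸ hxt)
              · exact hU2.2 (h ▸ hxt)
              · exact hU3.2 (h ▸ hxt)
          have hcomp := solve_complete (trips case n idx used) PySem.Set.empty (t :: F)
            (by intro u hu
                rcases List.mem_cons.mp hu with rfl | hu
                · exact ht
                · exact (hmem2 u hu).1)
            (List.pairwise_cons.mpr ⟨fun u hu => (hmem2 u hu).2, hp⟩)
            (by intro u _; exact ⟨by simp [PySem.Set.empty], by simp [PySem.Set.empty], by simp [PySem.Set.empty]⟩)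
          simp only [List.length_cons] at hcomp
          push_cast at hcomp
          omega
      · obtain ⟨F, hm, hp, _, he⟩ := solve_sound (trips case n idx used) PySem.Set.empty
        by_cases hFnil : F = []
        · subst hFnil
          rw [he]
          simpa using (PySem.List.le_foldl_max_int (trips case n idx used)
            (fun t => (cnt+1) + solve (trips case n (idx+1) (markT used t)) PySem.Set.empty) cnt).1
        · obtain ⟨t0, ht0, hmin⟩ := exists_min_fst F hFnil
          have hts0 := hm t0 ht0
          obtain ⟨c1, c2, c3, c4, c5, c6, c7, c8⟩ := mem_trips.mp hts0
          have hnd : F.Nodup := pairwise_nodup hp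
          have hdisj : ∀ u ∈ F.erase t0, disjT t0 u := by
            intro u hu
            have h2 : u ≠ t0 := ((List.Nodup.mem_erase_iff hnd).mp hu).1
            exact (hp.forall (fun a b hab => disjT_symm hab)) ht0 (List.mem_of_mem_erase hu) h2.symm
          have hmem' : ∀ u ∈ F.erase t0, u ∈ trips case n (idx+1) (markT used t0) := by
            intro u hu
            have hd := hdisj u hu
            obtain ⟨d1, d2, d3, d4, d5, d6, d7, d8⟩ := mem_trips.mp (hm u (List.mem_of_mem_erase hu))
            have hnt1 : ¬ tmem u.1 t0 := fun h => hd u.1 h (Or.inl rfl)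
            have hnt2 : ¬ tmem u.2.1 t0 := fun h => hd u.2.1 h (Or.inr (Or.inl rfl))
            have hnt3 : ¬ tmem u.2.2 t0 := fun h => hd u.2.2 h (Or.inr (Or.inr rfl))
            have hne1 : u.1 ≠ t0.1 := fun h => hnt1 (Or.inl h)
            have hu1 : idx + 1 ≤ u.1 := by
              have := hmin u (List.mem_of_mem_erase hu)
              omega
            exact mem_trips.mpr ⟨hu1, d2, d3, d4,
              (markT_getD_false (by omega) c2 c3 (by omega) (by omega)).mpr ⟨d5, hnt1⟩,
              (markT_getD_false (by omega) c2 c3 (by omega) (by omega)).mpr ⟨d6, hnt2⟩,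
              (markT_getD_false (by omega) c2 c3 (by omega) (by omega)).mpr ⟨d7, hnt3⟩, d8⟩
          have hcomp := solve_complete (trips case n (idx+1) (markT used t0)) PySem.Set.empty (F.erase t0)
            hmem' (hp.sublist List.erase_sublist)
            (by intro u _; exact ⟨by simp [PySem.Set.empty], by simp [PySem.Set.empty], by simp [PySem.Set.empty]⟩)
          have hlen := List.length_erase_of_mem ht0
          have hFpos : 0 < F.length := List.length_pos_of_mem ht0
          have hfinal := (PySem.List.le_foldl_max_int (trips case n idx used)
            (fun t => (cnt+1) + solve (trips case n (idx+1) (markT used t)) PySem.Set.empty) cnt).2 t0 hts0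
          rw [hlen] at hcomp
          rw [he]
          omega

-- ===== VERDICT (by name: the statement is the Claim_ definition above) =====
theorem dfs_spec : Claim_equal_dfs := by
  intro case n idx used cnt _ hPre
  show dfs case n idx used cnt = dfs_alt case n idx used cnt
  rcases hPre with ⟨h0, hu, hc⟩ | hni
  · exact dfs_main case n (n - idx).toNat idx used cnt (le_refl _) h0 hu hc
  · rw [dfs_base hni]
    show _ = cnt + solve (trips case n idx used) PySem.Set.empty
    rw [trips_nil hni]
    simp [solve]
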